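-- pv_equiv track=rewrite | github.com/HackademicsForum/Cyprium | kernel/utils.py | format_multiwords
-- ===== SOURCE A (Python) =====
-- def format_multiwords(words, sep=' '):
--     """
--     Format words as multi-lines text output.
--     Returns a list of lines.
--     (this) (is,was,will be) (a) (test):
--            is
--     this   was   a test
--          will be
--     """
--     # Check we have no void list of words...
--     t_words = words
--     for i, w in enumerate(t_words):
--         if not w:
--             if not isinstance(words, list):
--                 words = list(words)
--             words[i] = ('-@$!$@-',)
--     # Higher number of possibilities for a single word.
--     if len(words) > 1:
--         max_nr = len(max(*words, key=len))
--     else: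
--         max_nr = len(max(words, key=len))
--     if max_nr == 1:
--         return [sep.join((w[0] for w in words))]
--     # Get start/end line number for each word in words.
--     els_nr = []
--     for e in words:
--         diff_e = max_nr - len(e)
--         min_e = diff_e // 2
--         max_e = max_nr - (diff_e - min_e) - 1
--         els_nr.append((min_e, max_e))
--     # Format line.
--     fmt_line = sep.join(["{{: ^{}}}".format(len(max(els, key=len)))
--                          for els in words])
--
--     ret = []
--     for i in range(max_nr):
--         els = []
--         for idx, e in enumerate(words):
--             if els_nr[idx][0] <= i <= els_nr[idx][1]:
--                 els.append(e[i - els_nr[idx][0]])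
--             else:
--                 els.append('')
--         ret.append(fmt_line.format(*els))
--     return ret
-- ===== SOURCE B (Python) =====
-- def format_multiwords(words, sep=' '):
--     # Build one padded, centered column per word, then transpose.
--     # (Return-value equivalence only: A mutates a list argument in place
--     # when it contains an empty word; B does not.)
--     def center(s, width):
--         pad = width - len(s)
--         return ' ' * (pad // 2) + s + ' ' * (pad - pad // 2)
--     cols = [list(w) if w else ['-@$!$@-'] for w in words]
--     max_nr = max(len(c) for c in cols)
--     if max_nr == 1:
--         return [sep.join(c[0] for c in cols)]
--     padded = []
--     for c in cols:
--         top = (max_nr - len(c)) // 2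
--         cells = [''] * top + c + [''] * (max_nr - len(c) - top)
--         width = max(len(s) for s in c)
--         padded.append([center(s, width) for s in cells])
--     return [sep.join(row) for row in zip(*padded)]
-- ===== Notes on version B (the rewrite author's own statement) =====
-- stated objective: simpler
-- what changed: Replaces A's line-by-line double loop with a per-word bounds check (els_nr ranges indexed per output line) by building one padded, centered column per word and transposing with zip(*columns).
-- outside the precondition, e.g. on format_multiwords([['a', 'b'], ['cc']], '{{'): A returns ['a{cc', 'b{  '], B returns ['a{{cc', 'b{{  ']; on format_multiwords([['a', 'b'], ['cc']], '{}'): A raises IndexError, B returns ['a{}cc', 'b{}  ']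
import Mathlib
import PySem

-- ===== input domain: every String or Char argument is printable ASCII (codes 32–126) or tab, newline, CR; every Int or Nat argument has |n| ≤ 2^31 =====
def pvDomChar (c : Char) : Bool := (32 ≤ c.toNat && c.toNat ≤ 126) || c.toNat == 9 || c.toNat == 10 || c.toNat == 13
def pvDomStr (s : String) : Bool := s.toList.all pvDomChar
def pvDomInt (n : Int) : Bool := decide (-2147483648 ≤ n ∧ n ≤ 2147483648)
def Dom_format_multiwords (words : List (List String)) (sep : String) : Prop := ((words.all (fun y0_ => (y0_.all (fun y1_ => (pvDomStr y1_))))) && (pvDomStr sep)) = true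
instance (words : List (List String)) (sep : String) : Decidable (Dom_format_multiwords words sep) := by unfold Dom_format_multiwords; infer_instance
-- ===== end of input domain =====

-- B replaces A's index-bounded line×word double loop by building one padded, centered
-- column per word and transposing (simpler decomposition; return-value equivalence only:
-- A mutates a list argument in place when it contains an empty word, B does not).

-- ===== PORT A =====
-- Python "{: ^w}".format(s): center s in a field of width w, extra space on the right.
def pyCenterFmt (w : Nat) (s : String) : String :=
  let pad := w - s.toList.length
  String.ofList (List.replicate (pad / 2) ' ' ++ s.toList ++ List.replicate (pad - pad / 2) ' ')

def format_multiwords (words : List (List String)) (sep : String) : List String :=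
  -- the enumerate loop assigning words[i] = ('-@$!$@-',) for each empty word, positionally
  let ws := words.map (fun w => if w.isEmpty then ["-@$!$@-"] else w)
  -- len(max(*words, key=len)) / len(max(words, key=len)): length of the first longest word
  let max_nr :=
    match ws with
    | [] => 0  -- Python: max() raises TypeError; excluded by Pre_
    | h :: t => (t.foldl (fun acc w => if w.length > acc.length then w else acc) h).length
  if max_nr = 1 then
    [PySem.Str.join sep (ws.map (fun w => w.headD ""))]
  else
    let els_nr := ws.map (fun e =>
      let diff_e := max_nr - e.length
      let min_e := diff_e / 2
      (min_e, max_nr - (diff_e - min_e) - 1))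
    -- per-column field width: len(max(els, key=len))
    let widths := ws.map (fun e =>
      match e with
      | [] => 0
      | h :: t => (t.foldl (fun acc s => if s.toList.length > acc.toList.length then s else acc) h).toList.length)
    -- fmt_line.format(*els) = sep-join of each el centered to its column width
    -- (exact because Pre_ bars '{'/'}' in sep on this branch)
    (List.range max_nr).map (fun i =>
      let els := (ws.zip els_nr).map (fun p =>
        if p.2.1 ≤ i ∧ i ≤ p.2.2 then p.1.getD (i - p.2.1) "" else "")
      PySem.Str.join sep ((els.zip widths).map (fun q => pyCenterFmt q.2 q.1)))

-- ===== PORT B =====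
-- Source B's center(s, width): pad//2 spaces left, the rest right.
def pvCenter (s : String) (width : Nat) : String :=
  let pad := width - s.toList.length
  String.ofList (List.replicate (pad / 2) ' ' ++ s.toList ++ List.replicate (pad - pad / 2) ' ')

-- zip(*cols): rows of heads while every column is nonempty (fuel = row count, a totality guard)
def pvZipStar : Nat → List (List String) → List (List String)
  | 0, _ => []
  | n + 1, cols =>
    if cols ≠ [] ∧ cols.all (fun c => !c.isEmpty) then
      cols.map (fun c => c.headD "") :: pvZipStar n (cols.map (fun c => c.tail))
    else []

def format_multiwords_alt (words : List (List String)) (sep : String) : List String :=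
  let cols := words.map (fun w => if w.isEmpty then ["-@$!$@-"] else w)
  let max_nr :=
    match cols.map List.length with
    | [] => 0  -- Python: max() of nothing raises ValueError; excluded by Pre_
    | h :: t => t.foldl max h
  if max_nr = 1 then
    [PySem.Str.join sep (cols.map (fun c => c.headD ""))]
  else
    let padded := cols.map (fun c =>
      let top := (max_nr - c.length) / 2
      let cells := List.replicate top "" ++ c ++ List.replicate (max_nr - c.length - top) ""
      let width :=
        match c.map (fun s => s.toList.length) with
        | [] => 0
        | h :: t => t.foldl max h
      cells.map (fun s => pvCenter s width))
    (pvZipStar max_nr padded).map (fun row => PySem.Str.join sep row)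

-- ===== PRECONDITION & SPEC =====
-- Pre_ excludes the empty word list (A raises there) and, when some word has two or more
-- alternatives, separators containing '{' or '}': A's fmt_line.format then parses the
-- separator as format-string syntax (usually raising ValueError/IndexError; doubled braces
-- are collapsed into one), a format-injection artefact of building fmt_line by joining.
def Pre_format_multiwords (words : List (List String)) (sep : String) : Prop :=
  words ≠ [] ∧ ((¬ '{' ∈ sep.toList ∧ ¬ '}' ∈ sep.toList) ∨ ∀ w ∈ words, w.length ≤ 1)
instance (words : List (List String)) (sep : String) : Decidable (Pre_format_multiwords words sep) := by unfold Pre_format_multiwords; infer_instance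

def pvWitness_format_multiwords : List (List String) × String := ([["this"], ["is", "was", "will be"], ["a"], ["test:"]], " ")

def Spec_format_multiwords (words : List (List String)) (sep : String) (out : List String) : Prop := out = format_multiwords_alt words sep
instance (words : List (List String)) (sep : String) (out : List String) : Decidable (Spec_format_multiwords words sep out) := by unfold Spec_format_multiwords; infer_instance

-- ===== CLAIM (what is proved, stated in full; the proofs are below) =====
def Claim_equal_format_multiwords : Prop := ∀ (words : List (List String)) (sep : String), Dom_format_multiwords words sep → Pre_format_multiwords words sep → Spec_format_multiwords words sep (format_multiwords words sep)

-- ===== LEMMAS AND PROOFS =====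

-- A's max(..., key=len) followed by len equals B's fold of max over the lengths.
theorem pv_argmax_len {α : Type} (f : α → Nat) (t : List α) (h : α) :
    f (t.foldl (fun acc x => if f x > f acc then x else acc) h) = (t.map f).foldl max (f h) := by
  induction t generalizing h with
  | nil => rfl
  | cons x t ih =>
      simp only [List.foldl_cons, List.map_cons]
      rw [ih]
      congr 1
      split_ifs with hfx <;> omega

theorem pv_zipStar_eq (n : Nat) (cols : List (List String)) (hne : cols ≠ [])
    (hlen : ∀ c ∈ cols, c.length = n) :
    pvZipStar n cols = (List.range n).map (fun i => cols.map (fun c => c.getD i "")) := by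
  induction n generalizing cols with
  | zero => rfl
  | succ n ih =>
      have hcne : ∀ c ∈ cols, c ≠ [] := by
        intro c hc h0
        have := hlen c hc; simp [h0] at this
      rw [pvZipStar]
      rw [if_pos ⟨hne, by
        simp only [List.all_eq_true]
        intro c hc
        simpa using hcne c hc⟩]
      rw [ih (cols.map (fun c => c.tail))
          (by simpa using hne)
          (by
            intro c hc
            simp only [List.mem_map] at hc
            obtain ⟨c', hc', rfl⟩ := hc
            have := hlen c' hc'
            simp [List.length_tail, this])]
      rw [List.range_succ_eq_map]
      simp only [List.map_cons, List.map_map]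
      refine List.cons_eq_cons.mpr ⟨?_, ?_⟩
      · exact List.map_congr_left (fun c hc => by
          obtain ⟨x, xs, rfl⟩ := List.exists_cons_of_ne_nil (hcne c hc)
          rfl)
      · apply List.map_congr_left
        intro i _
        apply List.map_congr_left
        intro c hc
        obtain ⟨x, xs, rfl⟩ := List.exists_cons_of_ne_nil (hcne c hc)
        simp [Function.comp, Nat.succ_eq_add_one]

-- the padded column read at row i equals A's bounds-checked selector, centered
theorem pv_cell_eq (c : List String) (hc : c ≠ []) (max_nr : Nat) (hle : c.length ≤ max_nr)
    (i : Nat) (hi : i < max_nr) :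
    ((List.replicate ((max_nr - c.length) / 2) "" ++ c ++
        List.replicate (max_nr - c.length - (max_nr - c.length) / 2) "").getD i "")
      = (if (max_nr - c.length) / 2 ≤ i ∧
            i ≤ max_nr - ((max_nr - c.length) - (max_nr - c.length) / 2) - 1 then
           c.getD (i - (max_nr - c.length) / 2) ""
         else "") := by
  have hclen : 1 ≤ c.length := List.length_pos_of_ne_nil hc
  set top := (max_nr - c.length) / 2 with htop
  have htop2 : top ≤ max_nr - c.length := Nat.div_le_self _ _
  have hub : max_nr - ((max_nr - c.length) - top) - 1 = top + c.length - 1 := by omega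
  rw [hub]
  simp only [List.getD_eq_getElem?_getD, List.append_assoc]
  by_cases h1 : i < top
  · rw [if_neg (by omega)]
    rw [List.getElem?_append_left (by simpa using h1)]
    simp [h1]
  · by_cases h2 : i < top + c.length
    · rw [if_pos ⟨by omega, by omega⟩]
      rw [List.getElem?_append_right (by simp; omega)]
      simp only [List.length_replicate]
      rw [List.getElem?_append_left (by omega)]
    · rw [if_neg (by omega)]
      rw [List.getElem?_append_right (by simp; omega)]
      simp only [List.length_replicate]
      rw [List.getElem?_append_right (by omega)]
      rw [List.getElem?_replicate, if_pos (by omega)]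
      rfl

theorem pv_getD_map_of_lt {α β : Type} (f : α → β) (l : List α) (i : Nat) (d : α) (d' : β)
    (h : i < l.length) : (l.map f).getD i d' = f (l.getD i d) := by
  rw [List.getD_eq_getElem _ _ (by simpa using h), List.getElem_map, List.getD_eq_getElem _ _ h]

-- ===== VERDICT (by name: the statement is the Claim_ definition above) =====
theorem format_multiwords_spec : Claim_equal_format_multiwords := by
  intro words sep _ hpre
  obtain ⟨hwne, -⟩ := hpre
  unfold Spec_format_multiwords format_multiwords format_multiwords_alt
  have hne : words.map (fun w => if w.isEmpty then ["-@$!$@-"] else w) ≠ [] := by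
    simpa using hwne
  obtain ⟨h, t, hcons⟩ := List.exists_cons_of_ne_nil hne
  have hnonnil : ∀ c ∈ h :: t, c ≠ [] := by
    intro c hc
    rw [← hcons] at hc
    simp only [List.mem_map] at hc
    obtain ⟨w, -, rfl⟩ := hc
    split_ifs <;> simp_all [List.isEmpty_iff]
  dsimp only
  rw [hcons,
      show (List.map List.length (h :: t)) = h.length :: List.map List.length t from rfl]
  dsimp only
  -- the two max_nr computations agree
  have hmax : ((t.foldl (fun acc w => if w.length > acc.length then w else acc) h).length)
      = (t.map List.length).foldl max h.length := pv_argmax_len List.length t h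
  simp only [hmax]
  set max_nr := (t.map List.length).foldl max h.length with hmaxnr
  have hbound : ∀ c ∈ h :: t, c.length ≤ max_nr := by
    intro c hc
    rcases List.mem_cons.mp hc with rfl | hc
    · exact (PySem.List.le_foldl_max (t.map List.length) c.length).1
    · exact (PySem.List.le_foldl_max (t.map List.length) h.length).2 _
        (List.mem_map_of_mem hc)
  by_cases h1 : max_nr = 1
  · rw [if_pos h1, if_pos h1]
  · rw [if_neg h1, if_neg h1]
    have hmaxpos : 1 ≤ max_nr :=
      le_trans (List.length_pos_of_ne_nil (hnonnil h (by simp))) (hbound h (by simp))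
    -- rewrite B's transpose as an indexed map over the rows
    rw [pv_zipStar_eq max_nr _ (by simp)
        (by
          intro c hc
          simp only [List.mem_map] at hc
          obtain ⟨c', hc', rfl⟩ := hc
          have := hbound c' hc'
          simp only [List.length_append, List.length_map, List.length_replicate]
          omega)]
    rw [List.map_map]
    apply List.map_congr_left
    intro i hi
    have hi' : i < max_nr := List.mem_range.mp hi
    -- both rows are maps over the same column list
    rw [← List.map_prod_left_eq_zip, List.map_map, List.zip_map', List.map_map]
    simp only [Function.comp_apply]
    rw [List.map_map]
    congr 1
    apply List.map_congr_left
    intro c hc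
    obtain ⟨x, xs, rfl⟩ := List.exists_cons_of_ne_nil (hnonnil c hc)
    simp only [Function.comp_apply]
    -- B's cell: getD through the centering map, then pv_cell_eq
    have hclen : (x :: xs).length ≤ max_nr := hbound _ hc
    have hlencells :
        (List.replicate ((max_nr - (x :: xs).length) / 2) ("" : String) ++ (x :: xs) ++
          List.replicate (max_nr - (x :: xs).length - (max_nr - (x :: xs).length) / 2) "").length
          = max_nr := by
      simp only [List.length_append, List.length_replicate]; omega
    have hgl : i < (List.replicate ((max_nr - (x :: xs).length) / 2) ("" : String) ++ (x :: xs) ++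
        List.replicate (max_nr - (x :: xs).length - (max_nr - (x :: xs).length) / 2) "").length := by
      rw [hlencells]; exact hi'
    rw [pv_getD_map_of_lt _ _ _ "" "" hgl]
    rw [pv_cell_eq (x :: xs) (by simp) max_nr hclen i hi']
    -- the per-column widths agree (first-longest string vs fold of max over lengths)
    dsimp only [List.map_cons]
    rw [pv_argmax_len (fun s => s.toList.length) xs x]
    split_ifs <;> rfl
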